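-- pv_equiv track=rewrite | github.com/rzAlejandro/Practicas-Universidad | Practicas-Algebra-Computacional/actividad3.py | es_posible_ganar_con_n_piedras
-- ===== SOURCE A (Python) =====
-- ganar = {}
--
-- mov = [6,2,1]
--
-- def es_posible_ganar_con_n_piedras(n):
--     k = 1
--     while k <= n:
--         ganar[k] = False #Como es or no afecta
--         for j in range(3):
--             if k - mov[j] > 0: # Si es menor o igual que 0 ha perdido, es false y no aporta nada al or.
--                 ganar[k] = ganar[k] or not ganar[k - mov[j]]
--         k += 1
--     return ganar[n]
-- ===== SOURCE B (Python) =====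
-- def es_posible_ganar_con_n_piedras(n):
--     # The win/lose sequence of the {6,2,1} subtraction game (with this file's
--     # convention that moving to <= 0 is not allowed and no move means losing)
--     # is periodic with period 7: losing exactly when n % 7 is 1 or 4.
--     return n % 7 not in (1, 4)
-- ===== Notes on version B (the rewrite author's own statement) =====
-- stated objective: faster
-- what changed: B replaces the O(n) dynamic-programming table over all positions 1..n by the closed-form periodic answer n % 7 not in (1, 4), proved equal to the DP recurrence.
import Mathlib
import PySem

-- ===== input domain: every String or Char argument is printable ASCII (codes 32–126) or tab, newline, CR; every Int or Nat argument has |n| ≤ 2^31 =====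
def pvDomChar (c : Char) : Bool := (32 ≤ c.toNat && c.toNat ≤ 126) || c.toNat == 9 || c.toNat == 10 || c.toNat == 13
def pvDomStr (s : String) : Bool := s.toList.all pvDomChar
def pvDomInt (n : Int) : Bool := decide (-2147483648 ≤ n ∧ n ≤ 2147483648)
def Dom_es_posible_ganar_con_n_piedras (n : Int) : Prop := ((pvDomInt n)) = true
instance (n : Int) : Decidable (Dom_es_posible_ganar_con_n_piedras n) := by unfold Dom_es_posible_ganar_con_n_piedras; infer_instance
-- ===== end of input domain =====

-- B replaces A's O(n) DP table over positions 1..n by the period-7 closed form n % 7 ∉ {1, 4}.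
-- Return value only: A also mutates the module-level dict 'ganar', which B does not.

-- ===== PORT A =====
-- module-level 'mov = [6,2,1]'
def pvMov : List Int := [6, 2, 1]

-- hand-ported dict (PySem.Dict.insert is O(size) here and too slow for the tester's inputs):
-- the dict 'ganar' is kept as an association list with PREPEND for 'ganar[k] = v' and
-- first-match lookup for 'ganar[x]'. This is exact for A: first match = most recently
-- written binding, which is precisely Python's dict lookup, and A's result only ever
-- reads values (never iterates the dict), so insertion order is irrelevant.
def pvFind (l : List (Int × Bool)) (key : Int) : Option Bool :=
  match l with
  | [] => none
  | (a, b) :: t => if a = key then some b else pvFind t key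

def pvStepA (l : List (Int × Bool)) (k : Int) : List (Int × Bool) :=
  let l := (k, false) :: l
  (List.range 3).foldl (fun l j =>
    let m := (PySem.List.pyGet? pvMov (Int.ofNat j)).getD 0
    if k - m > 0 then
      (k, ((pvFind l k).getD false) || !((pvFind l (k - m)).getD false)) :: l
    else l) l

def pvLoopA (n : Int) (fuel : Nat) (k : Int) (l : List (Int × Bool)) : List (Int × Bool) :=
  match fuel with
  | 0 => l
  | f + 1 => if k ≤ n then pvLoopA n f (k + 1) (pvStepA l k) else l

-- 'k = 1; while k <= n: …; k += 1' is pvLoopA above (fuel recursion; fuel n.toNat covers every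
-- iteration); 'return ganar[n]': the key is present for every admitted n (Pre_ below), so getD is exact.
def es_posible_ganar_con_n_piedras (n : Int) : Bool :=
  (pvFind (pvLoopA n n.toNat 1 []) n).getD false

-- ===== PORT B =====
def es_posible_ganar_con_n_piedras_alt (n : Int) : Bool :=
  let r := PySem.Int.mod n 7
  !(r == 1 || r == 4)

-- ===== PRECONDITION & SPEC =====
-- A raises KeyError for n < 1 (the loop body never runs and 'ganar[n]' is missing); excluded.
def Pre_es_posible_ganar_con_n_piedras (n : Int) : Prop := 1 ≤ n
instance (n : Int) : Decidable (Pre_es_posible_ganar_con_n_piedras n) := by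
  unfold Pre_es_posible_ganar_con_n_piedras; infer_instance
def pvWitness_es_posible_ganar_con_n_piedras : Int := 9

def Spec_es_posible_ganar_con_n_piedras (n : Int) (out : Bool) : Prop :=
  out = es_posible_ganar_con_n_piedras_alt n
instance (n : Int) (out : Bool) : Decidable (Spec_es_posible_ganar_con_n_piedras n out) := by
  unfold Spec_es_posible_ganar_con_n_piedras; infer_instance

-- ===== CLAIM (what is proved, stated in full; the proofs are below) =====
def Claim_equal_es_posible_ganar_con_n_piedras : Prop :=
  ∀ (n : Int), Dom_es_posible_ganar_con_n_piedras n →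
    Pre_es_posible_ganar_con_n_piedras n →
    Spec_es_posible_ganar_con_n_piedras n (es_posible_ganar_con_n_piedras n)

-- ===== LEMMAS AND PROOFS =====

-- the closed-form winning predicate (what B computes, unfolded)
def pvW (i : Int) : Bool := !(i % 7 == 1 || i % 7 == 4)

theorem pvAlt_eq_pvW (n : Int) : es_posible_ganar_con_n_piedras_alt n = pvW n := by
  simp [es_posible_ganar_con_n_piedras_alt, pvW]

theorem pvFind_cons (a : Int) (b : Bool) (l : List (Int × Bool)) (j : Int) :
    pvFind ((a, b) :: l) j = if a = j then some b else pvFind l j := rfl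

theorem pvW_rec (k : Int) (hk : 1 ≤ k) :
    pvW k = (((false || (if k - 6 > 0 then !pvW (k-6) else false))
              || (if k - 2 > 0 then !pvW (k-2) else false))
              || (if k - 1 > 0 then !pvW (k-1) else false)) := by
  simp only [pvW, Bool.not_not, Bool.false_or]
  split_ifs with h6 h2 h1 <;>
    [skip; omega; omega; omega; skip; omega; skip; skip] <;>
    (rw [Bool.eq_iff_iff]
     simp only [Bool.or_eq_true, beq_iff_eq, Bool.not_eq_true', Bool.or_eq_false_iff,
       beq_eq_false_iff_ne, ne_eq, Bool.or_self, Bool.false_eq_true, iff_false, false_or]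
     omega)

theorem pvStepA_eq (l : List (Int × Bool)) (k : Int) :
    pvStepA l k =
      (let l1 := (k, false) :: l
       let l2 := if k - 6 > 0 then (k, ((pvFind l1 k).getD false) || !((pvFind l1 (k-6)).getD false)) :: l1 else l1
       let l3 := if k - 2 > 0 then (k, ((pvFind l2 k).getD false) || !((pvFind l2 (k-2)).getD false)) :: l2 else l2
       if k - 1 > 0 then (k, ((pvFind l3 k).getD false) || !((pvFind l3 (k-1)).getD false)) :: l3 else l3) := rfl

theorem pvStepA_find (l : List (Int × Bool)) (k : Int) (hk : 1 ≤ k)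
    (hinv : ∀ i : Int, 1 ≤ i → i < k → pvFind l i = some (pvW i)) (j : Int) :
    pvFind (pvStepA l k) j = if j = k then some (pvW k) else pvFind l j := by
  have eg6 : k - 6 > 0 → pvFind l (k-6) = some (pvW (k-6)) := fun _ => hinv _ (by omega) (by omega)
  have eg2 : k - 2 > 0 → pvFind l (k-2) = some (pvW (k-2)) := fun _ => hinv _ (by omega) (by omega)
  have eg1 : k - 1 > 0 → pvFind l (k-1) = some (pvW (k-1)) := fun _ => hinv _ (by omega) (by omega)
  have ne6 : ¬(k = k - 6) := by omega
  have ne2 : ¬(k = k - 2) := by omega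
  have ne1 : ¬(k = k - 1) := by omega
  by_cases hj : j = k
  · rw [if_pos hj, hj, pvStepA_eq, pvW_rec k hk]
    dsimp only
    split_ifs <;>
      first
      | omega
      | simp_all only [pvFind_cons, if_pos rfl, if_true, ne6, ne2, ne1, if_false,
          Option.getD_some, Bool.false_or, Bool.or_false, Bool.or_self]
  · rw [if_neg hj, pvStepA_eq]
    dsimp only
    have nj : ¬(k = j) := fun h => hj h.symm
    split_ifs <;> simp only [pvFind_cons, if_neg nj]

theorem pvLoopA_inv (n : Int) (f : Nat) (k : Int) (l : List (Int × Bool))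
    (hk : 1 ≤ k)
    (hinv : ∀ i : Int, 1 ≤ i → i < k → pvFind l i = some (pvW i)) :
    ∀ i : Int, 1 ≤ i → i ≤ n → i < k + f → pvFind (pvLoopA n f k l) i = some (pvW i) := by
  induction f generalizing k l with
  | zero => intro i h1 _ h3; exact hinv i h1 (by omega)
  | succ f ih =>
    intro i h1 h2 h3
    by_cases hkn : k ≤ n
    · rw [pvLoopA, if_pos hkn]
      refine ih (k + 1) (pvStepA l k) (by omega) ?_ i h1 h2 (by omega)
      intro i h1 h2
      rw [pvStepA_find l k hk hinv]
      by_cases hik : i = k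
      · simp [hik]
      · rw [if_neg hik]; exact hinv i h1 (by omega)
    · rw [pvLoopA, if_neg hkn]; exact hinv i h1 (by omega)

-- ===== VERDICT (by name: the statement is the Claim_ definition above) =====
theorem es_posible_ganar_con_n_piedras_spec : Claim_equal_es_posible_ganar_con_n_piedras := by
  intro n _ hpre
  unfold Spec_es_posible_ganar_con_n_piedras es_posible_ganar_con_n_piedras
  rw [pvAlt_eq_pvW]
  have h := pvLoopA_inv n n.toNat 1 [] (by omega)
    (by intro i h1 h2; omega) n hpre le_rfl (by omega)
  rw [h]; rfl
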